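-- pv_equiv track=rewrite | github.com/khm1102/BOJ | 백준/Silver/24431. 유사 라임 게임/유사 라임 게임.py | solve
-- ===== SOURCE A (Python) =====
-- def solve(n, l, f, w):
--     suffix_dict = {}
--
--     for i in w:
--         suffix = i[-f:]
--
--         if suffix in suffix_dict:
--             suffix_dict[suffix].append(i)
--
--         else:
--             suffix_dict[suffix] = [i]
--
--     temp = 0
--     for i in suffix_dict.values():
--         temp += len(i) // 2
--
--     return temp
-- ===== SOURCE B (Python) =====
-- def solve(n, l, f, w):
--     total = 0
--     run = 0
--     cur = None
--     for x in sorted(w, key=lambda x: x[-f:]):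
--         s = x[-f:]
--         if s == cur:
--             run += 1
--         else:
--             total += run // 2
--             cur = s
--             run = 1
--     return total + run // 2
-- ===== Notes on version B (the rewrite author's own statement) =====
-- stated objective: alternative
-- what changed: B replaces A's dictionary of per-suffix word lists with a sort by the length-f suffix followed by a single run-length scan that adds run//2 at each suffix change.
import Mathlib
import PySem

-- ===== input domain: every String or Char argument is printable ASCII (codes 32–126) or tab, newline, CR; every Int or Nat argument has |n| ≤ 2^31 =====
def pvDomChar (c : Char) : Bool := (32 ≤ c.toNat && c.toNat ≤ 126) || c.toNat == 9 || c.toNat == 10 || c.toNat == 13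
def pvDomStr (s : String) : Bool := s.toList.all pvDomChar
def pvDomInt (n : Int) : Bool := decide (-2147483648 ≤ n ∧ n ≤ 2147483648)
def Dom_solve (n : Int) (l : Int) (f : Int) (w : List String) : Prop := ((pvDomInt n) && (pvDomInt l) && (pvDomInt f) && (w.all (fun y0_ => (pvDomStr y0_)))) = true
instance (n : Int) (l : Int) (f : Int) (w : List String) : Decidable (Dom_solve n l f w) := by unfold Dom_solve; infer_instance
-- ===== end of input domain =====

-- B groups equal suffixes by sorting and a run-length scan instead of A's dictionary of lists; same result, alternative algorithm.

-- ===== PORT A =====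
def solve (n : Int) (l : Int) (f : Int) (w : List String) : Int :=
  let suffix_dict : PySem.Dict String (List String) :=
    w.foldl (fun d i =>
      let suffix := PySem.Str.slice i (some (-f)) none
      if d.contains suffix then d.insert suffix (d.getD suffix [] ++ [i])
      else d.insert suffix [i]) PySem.Dict.empty
  suffix_dict.values.foldl (fun temp g => temp + PySem.Int.floordiv (g.length : Int) 2) 0

-- ===== PORT B =====
def solve_alt (n : Int) (l : Int) (f : Int) (w : List String) : Int :=
  let ws := PySem.List.sorted w (fun x => PySem.Str.slice x (some (-f)) none) false
  let st := ws.foldl (fun (st : Option String × Int × Int) x =>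
      let s := PySem.Str.slice x (some (-f)) none
      if some s = st.1 then (st.1, st.2.1 + 1, st.2.2)
      else (some s, 1, st.2.2 + PySem.Int.floordiv st.2.1 2)) (none, (0 : Int), (0 : Int))
  st.2.2 + PySem.Int.floordiv st.2.1 2

-- ===== PRECONDITION & SPEC =====
def Spec_solve (n : Int) (l : Int) (f : Int) (w : List String) (out : Int) : Prop := out = solve_alt n l f w
instance (n : Int) (l : Int) (f : Int) (w : List String) (out : Int) : Decidable (Spec_solve n l f w out) := by unfold Spec_solve; infer_instance

-- ===== CLAIM (what is proved, stated in full; the proofs are below) =====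
def Claim_equal_solve : Prop := ∀ (n : Int) (l : Int) (f : Int) (w : List String), Dom_solve n l f w → Spec_solve n l f w (solve n l f w)

-- ===== LEMMAS AND PROOFS =====

-- the length-f suffix key
def pvKey (f : Int) (x : String) : String := PySem.Str.slice x (some (-f)) none

-- canonical value: sum over the distinct suffixes of (count // 2)
def pvS (ks : List String) : Int :=
  ((PySem.List.dedup ks).map (fun c => PySem.Int.floordiv ((ks.count c : Nat) : Int) 2)).sum

-- B's scan step, on keys
def pvStep (st : Option String × Int × Int) (s : String) : Option String × Int × Int :=
  if some s = st.1 then (st.1, st.2.1 + 1, st.2.2)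
  else (some s, 1, st.2.2 + PySem.Int.floordiv st.2.1 2)

lemma foldl_add_eq_sum (h : List String → Int) :
    ∀ (l : List (List String)) (a : Int),
      l.foldl (fun t g => t + h g) a = a + (l.map h).sum := by
  intro l
  induction l with
  | nil => intro a; simp
  | cons x xs ih => intro a; simp [List.foldl_cons, ih, add_assoc]

lemma stepA_eq (f : Int) :
    (fun (d : PySem.Dict String (List String)) (i : String) =>
      let suffix := PySem.Str.slice i (some (-f)) none
      if d.contains suffix then d.insert suffix (d.getD suffix [] ++ [i])
      else d.insert suffix [i])
    = (fun d i => d.modify (pvKey f i) [] (· ++ [i])) := by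
  funext d i
  show _ = d.insert (pvKey f i) ((d.getD (pvKey f i) []) ++ [i])
  simp only [pvKey]
  by_cases h : d.contains (PySem.Str.slice i (some (-f)) none)
  · simp [h]
  · simp only [h, Bool.false_eq_true, if_false]
    rw [PySem.Dict.getD_of_not_contains d [] (by simpa using h)]
    simp

-- A equals the canonical sum
lemma solveA_eq_pvS (n l f : Int) (w : List String) :
    solve n l f w = pvS (w.map (pvKey f)) := by
  unfold solve
  rw [stepA_eq f]
  have hmap : (w.foldl (fun d i => d.modify (pvKey f i) [] (· ++ [i]))
      (PySem.Dict.empty : PySem.Dict String (List String)))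
      = (w.map (fun i => (pvKey f i, i))).foldl
          (fun d p => d.modify p.1 [] (· ++ [p.2])) PySem.Dict.empty := by
    rw [List.foldl_map]
  set d := w.foldl (fun d i => d.modify (pvKey f i) [] (· ++ [i]))
      (PySem.Dict.empty : PySem.Dict String (List String)) with hd
  have hkeys : d.keys = PySem.List.dedup (w.map (pvKey f)) := by
    rw [hd]
    rw [PySem.Dict.keys_foldl_modify_key w (pvKey f) [] (fun _ i => (· ++ [i]))]
    simp [PySem.Set.update, PySem.Dict.keys_empty, PySem.List.dedup_eq_ofList,
      PySem.Set.ofList_eq_foldl]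
  have hnodup : d.keys.Nodup := by
    rw [hd]
    exact PySem.Dict.nodup_keys_foldl_modify_key w (pvKey f) [] (fun _ i => (· ++ [i])) _
      (by simp)
  have hget : ∀ c, d.getD c [] = ((w.map (fun i => (pvKey f i, i))).filter
      (fun p => p.1 == c)).map (fun p => p.2) := by
    intro c
    rw [hmap]
    rw [PySem.Dict.getD_foldl_modify_append]
    simp [PySem.Dict.getD_empty]
  -- turn the values fold into a sum over the keys
  rw [foldl_add_eq_sum (fun g => PySem.Int.floordiv (g.length : Int) 2) d.values 0]
  have hvals : d.values.map (fun g => PySem.Int.floordiv (g.length : Int) 2)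
      = d.keys.map (fun k => PySem.Int.floordiv (((d.getD k []).length : Nat) : Int) 2) := by
    simp only [PySem.Dict.values, PySem.Dict.keys, List.map_map]
    apply List.map_congr_left
    intro p hp
    have : d.getD p.1 [] = p.2 :=
      PySem.Dict.getD_of_mem_items d (by simpa using hp) hnodup []
    simp [this]
  rw [zero_add, hvals, hkeys]
  unfold pvS
  apply congrArg
  apply List.map_congr_left
  intro c hc
  have hlen : (d.getD c []).length = (w.map (pvKey f)).count c := by
    rw [hget c, List.length_map]
    rw [List.count_eq_countP]
    rw [List.countP_map]
    rw [List.filter_map, List.length_map]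
    rw [List.countP_eq_length_filter]
    congr 1
  rw [hlen]

-- run of equal keys only increments the counter
lemma scan_run (k : String) :
    ∀ (r : List String), (∀ x ∈ r, x = k) → ∀ (rest : List String) (run t : Int),
      (r ++ rest).foldl pvStep (some k, run, t)
        = rest.foldl pvStep (some k, run + (r.length : Int), t) := by
  intro r
  induction r with
  | nil => intro _ rest run t; simp
  | cons x r' ih =>
    intro hall rest run t
    have hx : x = k := hall x (by simp)
    subst hx
    have h1 : pvStep (some x, run, t) x = (some x, run + 1, t) := by
      simp [pvStep]
    simp only [List.cons_append, List.foldl_cons, h1]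
    have harith : run + 1 + ((r'.length : Nat) : Int) = run + (((x :: r').length : Nat) : Int) := by
      simp only [List.length_cons]
      push_cast
      ring
    rw [ih (fun y hy => hall y (by simp [hy])) rest (run + 1) t, harith]

lemma k_not_mem_dropWhile (k : String) (rest : List String)
    (h : (k :: rest).Pairwise (· ≤ ·)) :
    k ∉ rest.dropWhile (fun x => x == k) := by
  intro hk
  cases ht : rest.dropWhile (fun x => x == k) with
  | nil => rw [ht] at hk; simp at hk
  | cons h1 tl =>
    rw [ht] at hk
    have hne' : h1 ≠ k := by
      have := List.head?_dropWhile_not (fun x => x == k) rest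
      rw [ht] at this
      simpa using this
    have hsub : (h1 :: tl).Sublist rest := ht ▸ List.dropWhile_sublist _
    have hpt : (h1 :: tl).Pairwise (· ≤ ·) := (List.pairwise_cons.mp h).2.sublist hsub
    have hkle : ∀ y ∈ rest, k ≤ y := (List.pairwise_cons.mp h).1
    rcases List.mem_cons.mp hk with heq | hmem
    · exact hne' heq.symm
    · have hh1k : h1 ≤ k := (List.pairwise_cons.mp hpt).1 k hmem
      have hkh1 : k ≤ h1 := hkle h1 (hsub.mem (by simp))
      exact hne' (le_antisymm hh1k hkh1)

lemma set_foldl_cons_notmem (k : String) :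
    ∀ (t : List String) (s : List String), k ∉ t →
      t.foldl PySem.Set.add (k :: s) = k :: t.foldl PySem.Set.add s := by
  intro t
  induction t with
  | nil => intro s _; simp
  | cons x t' ih =>
    intro s hk
    have hxk : x ≠ k := by intro h; exact hk (by simp [h])
    have hstep : PySem.Set.add (k :: s) x = k :: PySem.Set.add s x := by
      by_cases hmem : x ∈ s <;> simp [PySem.Set.add, PySem.Set.contains, hxk, hmem]
    simp only [List.foldl_cons, hstep]
    exact ih _ (fun h => hk (by simp [h]))

lemma dedup_group (k : String) (r t : List String)
    (hr : ∀ x ∈ r, x = k) (hkt : k ∉ t) :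
    PySem.List.dedup (k :: (r ++ t)) = k :: PySem.List.dedup t := by
  rw [PySem.List.dedup_eq_ofList, PySem.List.dedup_eq_ofList, PySem.Set.ofList_eq_foldl,
    PySem.Set.ofList_eq_foldl]
  have h0 : PySem.Set.add ([] : List String) k = [k] := by
    simp [PySem.Set.add, PySem.Set.contains]
  have hrfold : r.foldl PySem.Set.add [k] = [k] := by
    clear hkt
    induction r with
    | nil => rfl
    | cons x r' ih =>
      have hx : x = k := hr x (by simp)
      subst hx
      have : PySem.Set.add [x] x = [x] := by simp [PySem.Set.add, PySem.Set.contains]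
      simp only [List.foldl_cons, this]
      exact ih (fun y hy => hr y (by simp [hy]))
  simp only [List.foldl_cons, h0, List.foldl_append, hrfold]
  exact set_foldl_cons_notmem k t [] hkt

lemma pvS_group (k : String) (r t : List String)
    (hr : ∀ x ∈ r, x = k) (hkt : k ∉ t) :
    pvS (k :: (r ++ t)) = PySem.Int.floordiv (1 + (r.length : Int)) 2 + pvS t := by
  unfold pvS
  rw [dedup_group k r t hr hkt]
  rw [List.map_cons, List.sum_cons]
  have hcountk : ((k :: (r ++ t)).count k : Nat) = 1 + r.length := by
    rw [List.count_cons_self, List.count_append]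
    have h1 : r.count k = r.length := List.count_eq_length.mpr (fun b hb => ((hr b hb).symm))
    have h2 : t.count k = 0 := List.count_eq_zero.mpr hkt
    omega
  have hmap : (PySem.List.dedup t).map
        (fun c => PySem.Int.floordiv (((k :: (r ++ t)).count c : Nat) : Int) 2)
      = (PySem.List.dedup t).map (fun c => PySem.Int.floordiv ((t.count c : Nat) : Int) 2) := by
    apply List.map_congr_left
    intro c hc
    have hct : c ∈ t := (PySem.List.mem_dedup _ _).mp hc
    have hck : c ≠ k := fun h => hkt (h ▸ hct)
    have hcr : r.count c = 0 := List.count_eq_zero.mpr (fun h => hck ((hr c h)))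
    have hkc : ¬ (k = c) := fun h => hck h.symm
    have : ((k :: (r ++ t)).count c : Nat) = t.count c := by
      simp [List.count_append, hcr, hkc]
    rw [this]
  rw [hmap, hcountk]
  push_cast
  ring

-- the scan over a key-sorted list computes the canonical sum
lemma scan_main :
    ∀ (m : Nat) (ks : List String), ks.length ≤ m → ks.Pairwise (· ≤ ·) →
      ∀ (cur : Option String) (run t : Int),
        (∀ x, ks.head? = some x → cur ≠ some x) →
        (ks.foldl pvStep (cur, run, t)).2.2
          + PySem.Int.floordiv (ks.foldl pvStep (cur, run, t)).2.1 2
          = t + PySem.Int.floordiv run 2 + pvS ks := by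
  intro m
  induction m with
  | zero =>
    intro ks hlen _ cur run t _
    have : ks = [] := List.eq_nil_of_length_eq_zero (Nat.le_zero.mp hlen)
    subst this
    simp [pvS, PySem.List.dedup]
  | succ m ih =>
    intro ks hlen hpw cur run t hhead
    match hks : ks with
    | [] => simp [pvS, PySem.List.dedup]
    | k :: rest =>
      subst hks
      set r := rest.takeWhile (fun x => x == k) with hr
      set t' := rest.dropWhile (fun x => x == k) with ht'
      have hsplit : rest = r ++ t' := (List.takeWhile_append_dropWhile).symm
      have hrall : ∀ x ∈ r, x = k := by
        intro x hx
        have := List.mem_takeWhile_imp (hr ▸ hx)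
        simpa using this
      have hkt : k ∉ t' := k_not_mem_dropWhile k rest hpw
      have hstep1 : pvStep (cur, run, t) k = (some k, 1, t + PySem.Int.floordiv run 2) := by
        have : ¬ (some k = cur) := fun h => hhead k rfl h.symm
        simp [pvStep, this]
      rw [List.foldl_cons, hstep1]
      conv_lhs => rw [hsplit]
      rw [scan_run k r hrall t' 1 (t + PySem.Int.floordiv run 2)]
      have hlent' : t'.length ≤ m := by
        have h1 : t'.length ≤ rest.length := (List.dropWhile_sublist _).length_le
        simp at hlen
        omega
      have hpwt' : t'.Pairwise (· ≤ ·) :=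
        (List.pairwise_cons.mp hpw).2.sublist (List.dropWhile_sublist _)
      have hheadt' : ∀ x, t'.head? = some x → (some k : Option String) ≠ some x := by
        intro x hx h
        have hxk : x = k := by simpa using h.symm
        have hxm : x ∈ t' := List.mem_of_mem_head? hx
        exact hkt (hxk ▸ hxm)
      rw [ih t' hlent' hpwt' (some k) (1 + (r.length : Int)) (t + PySem.Int.floordiv run 2) hheadt']
      conv_rhs => rw [hsplit]
      rw [pvS_group k r t' hrall hkt]
      ring
  
-- B equals the canonical sum
lemma solveB_eq_pvS (n l f : Int) (w : List String) :
    solve_alt n l f w = pvS (w.map (pvKey f)) := by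
  show (List.foldl (fun st x => pvStep st (pvKey f x))
        ((none : Option String), (0 : Int), (0 : Int)) (PySem.List.sorted w (pvKey f) false)).2.2
      + PySem.Int.floordiv (List.foldl (fun st x => pvStep st (pvKey f x))
        ((none : Option String), (0 : Int), (0 : Int)) (PySem.List.sorted w (pvKey f) false)).2.1 2
      = pvS (List.map (pvKey f) w)
  rw [show (List.foldl (fun st x => pvStep st (pvKey f x))
        ((none : Option String), (0 : Int), (0 : Int)) (PySem.List.sorted w (pvKey f) false))
      = List.foldl pvStep ((none : Option String), (0 : Int), (0 : Int))
          ((PySem.List.sorted w (pvKey f) false).map (pvKey f)) from by rw [List.foldl_map]]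
  set ks' := (PySem.List.sorted w (pvKey f) false).map (pvKey f) with hks'
  have hpw : ks'.Pairwise (· ≤ ·) := PySem.List.sorted_map_key_pairwise w (pvKey f)
  have hperm : ks'.Perm (w.map (pvKey f)) := (PySem.List.sorted_perm w (pvKey f) false).map _
  have hmain := scan_main ks'.length ks' le_rfl hpw none 0 0
    (by intro x _ h; simp at h)
  rw [hmain]
  have hfd0 : PySem.Int.floordiv 0 2 = 0 := by decide
  rw [hfd0, zero_add, zero_add]
  -- pvS is invariant under permutation
  have hded : (PySem.List.dedup ks').Perm (PySem.List.dedup (w.map (pvKey f))) := by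
    rw [List.perm_ext_iff_of_nodup (PySem.List.nodup_dedup _) (PySem.List.nodup_dedup _)]
    intro a
    rw [PySem.List.mem_dedup, PySem.List.mem_dedup]
    exact hperm.mem_iff
  unfold pvS
  have hfun : (fun c => PySem.Int.floordiv ((ks'.count c : Nat) : Int) 2)
      = (fun c => PySem.Int.floordiv (((w.map (pvKey f)).count c : Nat) : Int) 2) := by
    funext c
    rw [hperm.count_eq]
  rw [hfun]
  exact (hded.map _).sum_eq

-- ===== VERDICT (by name: the statement is the Claim_ definition above) =====
theorem solve_spec : Claim_equal_solve := by
  intro n l f w _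
  unfold Spec_solve
  rw [solveA_eq_pvS, solveB_eq_pvS]
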